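-- pv_equiv track=rewrite | github.com/biomorph-plus/biomorph-evolve | biomorph.py | rotate_color
-- ===== SOURCE A (Python) =====
-- def rotate_color(color, sense):
--     color_ = [0, 0, 0]
--     if sense < 0:
--         for _ in range(-sense):
--             color_ = [color[2], color[0], color[1]]
--             color = color_
--     else:
--         for _ in range(sense):
--             color_ = [color[1], color[2], color[0]]
--             color = color_
--     return color
-- ===== SOURCE B (Python) =====
-- def rotate_color(color, sense):
--     c = color[:3]
--     k = sense % 3
--     return c[k:] + c[:k]
-- ===== Notes on version B (the rewrite author's own statement) =====
-- stated objective: simpler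
-- what changed: Replaces the one-step-at-a-time rotation loop (|sense| iterations) by a single slice rotation of the first three channels at offset sense % 3.
-- intended difference: On lists longer than three elements with sense == 0, A returns the whole list unchanged (its loop never runs) while B returns the three color channels unrotated, which is intended since A itself returns exactly three channels for every nonzero sense. — e.g. on rotate_color([1, 2, 3, 4], 0): A returns [1, 2, 3, 4], B returns [1, 2, 3]
import Mathlib
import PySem

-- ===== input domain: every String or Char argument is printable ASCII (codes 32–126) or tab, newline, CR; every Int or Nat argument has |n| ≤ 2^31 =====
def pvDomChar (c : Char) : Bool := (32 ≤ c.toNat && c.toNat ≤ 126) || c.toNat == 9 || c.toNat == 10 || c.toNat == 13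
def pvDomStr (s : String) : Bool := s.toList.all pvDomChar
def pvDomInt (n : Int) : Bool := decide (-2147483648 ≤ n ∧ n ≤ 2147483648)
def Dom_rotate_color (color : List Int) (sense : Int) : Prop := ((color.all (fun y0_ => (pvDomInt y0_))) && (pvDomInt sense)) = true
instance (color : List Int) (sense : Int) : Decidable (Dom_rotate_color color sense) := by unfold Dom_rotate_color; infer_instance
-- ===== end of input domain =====

-- B replaces A's step-by-step rotation loop by one slice rotation of the three color channels at
-- offset sense % 3; it differs from A only on the D_ corner stated below.

-- ===== PORT A =====
-- indexing is via pyGetD with default 0: exact whenever the index is in range, which Pre_ guarantees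
def rotate_color (color : List Int) (sense : Int) : List Int :=
  if sense < 0 then
    (List.range (-sense).toNat).foldl
      (fun c _ => [PySem.List.pyGetD c 2 0, PySem.List.pyGetD c 0 0, PySem.List.pyGetD c 1 0]) color
  else
    (List.range sense.toNat).foldl
      (fun c _ => [PySem.List.pyGetD c 1 0, PySem.List.pyGetD c 2 0, PySem.List.pyGetD c 0 0]) color

-- ===== PORT B =====
def rotate_color_alt (color : List Int) (sense : Int) : List Int :=
  let c := PySem.List.slice color none (some 3)
  let k := PySem.Int.mod sense 3
  PySem.List.slice c (some k) none ++ PySem.List.slice c none (some k)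

-- ===== PRECONDITION & SPEC =====
-- Pre_ excludes exactly the inputs on which A raises IndexError: lists of fewer than three
-- elements with a nonzero sense (the loop body then indexes past the end).
def Pre_rotate_color (color : List Int) (sense : Int) : Prop := sense = 0 ∨ 3 ≤ color.length
instance (color : List Int) (sense : Int) : Decidable (Pre_rotate_color color sense) := by unfold Pre_rotate_color; infer_instance
def pvWitness_rotate_color : List Int × Int := ([255, 128, 0], -4)

-- On lists longer than three with sense == 0, A returns the whole list unchanged while B returns
-- the first three channels; B's is the intended value: rotate_color yields the three color
-- channels (A itself returns exactly three for every nonzero sense), A's pass-through is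
-- leftover loop state from range(0).
def D_rotate_color (color : List Int) (sense : Int) : Prop := 3 < color.length ∧ sense = 0
instance (color : List Int) (sense : Int) : Decidable (D_rotate_color color sense) := by unfold D_rotate_color; infer_instance

def Spec_rotate_color (color : List Int) (sense : Int) (out : List Int) : Prop := ¬ D_rotate_color color sense → out = rotate_color_alt color sense
instance (color : List Int) (sense : Int) (out : List Int) : Decidable (Spec_rotate_color color sense out) := by unfold Spec_rotate_color; infer_instance

def pvDiffWitness_rotate_color : List Int × Int := ([1, 2, 3, 4], 0)
def pvDiffWitnessOut_rotate_color : (List Int) × (List Int) := ([1, 2, 3, 4], [1, 2, 3])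

-- ===== CLAIM (what is proved, stated in full; the proofs are below) =====
def Claim_unchanged_rotate_color : Prop := ∀ (color : List Int) (sense : Int), Dom_rotate_color color sense → Pre_rotate_color color sense → Spec_rotate_color color sense (rotate_color color sense)
def Claim_changed_rotate_color : Prop := Dom_rotate_color (pvDiffWitness_rotate_color.1) (pvDiffWitness_rotate_color.2) ∧ Pre_rotate_color (pvDiffWitness_rotate_color.1) (pvDiffWitness_rotate_color.2) ∧ D_rotate_color (pvDiffWitness_rotate_color.1) (pvDiffWitness_rotate_color.2) ∧ rotate_color (pvDiffWitness_rotate_color.1) (pvDiffWitness_rotate_color.2) = pvDiffWitnessOut_rotate_color.1 ∧ rotate_color_alt (pvDiffWitness_rotate_color.1) (pvDiffWitness_rotate_color.2) = pvDiffWitnessOut_rotate_color.2 ∧ pvDiffWitnessOut_rotate_color.1 ≠ pvDiffWitnessOut_rotate_color.2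
def Claim_exact_rotate_color : Prop := ∀ (color : List Int) (sense : Int), Dom_rotate_color color sense → Pre_rotate_color color sense → D_rotate_color color sense → rotate_color color sense ≠ rotate_color_alt color sense

-- ===== LEMMAS AND PROOFS =====

-- evaluating B's port on a list with at least three elements: the if-chain on sense % 3
theorem alt_eval (a b c : Int) (rest : List Int) (s : Int) :
    rotate_color_alt (a :: b :: c :: rest) s =
      if PySem.Int.mod s 3 = 0 then [a, b, c]
      else if PySem.Int.mod s 3 = 1 then [b, c, a] else [c, a, b] := by
  have hm : PySem.Int.mod s 3 = s % 3 := PySem.Int.mod_eq_emod_of_pos (by omega)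
  have h3 : s % 3 = 0 ∨ s % 3 = 1 ∨ s % 3 = 2 := by omega
  rcases h3 with h | h | h <;>
    simp [rotate_color_alt, hm, h, PySem.List.slice]

-- evaluating B's port at sense = 0: the first three channels unchanged
theorem alt_zero (color : List Int) : rotate_color_alt color 0 = color.take 3 := by
  simp [rotate_color_alt, PySem.List.slice, List.take_take]

-- A's positive-sense loop: n ≥ 1 steps from a list with ≥ 3 elements
theorem fold_pos (n : ℕ) (a b c : Int) (rest : List Int) (hn : n ≠ 0) :
    (List.range n).foldl
      (fun c' _ => [PySem.List.pyGetD c' 1 0, PySem.List.pyGetD c' 2 0, PySem.List.pyGetD c' 0 0])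
      (a :: b :: c :: rest) =
      if n % 3 = 0 then [a, b, c] else if n % 3 = 1 then [b, c, a] else [c, a, b] := by
  induction n with
  | zero => exact absurd rfl hn
  | succ m ih =>
    rcases Nat.eq_zero_or_pos m with hm | hm
    · subst hm
      simp [PySem.List.pyGetD, PySem.List.pyGet?, PySem.List.pyIdx?]
    · rw [List.range_succ, List.foldl_append, ih (by omega)]
      have h3 : m % 3 = 0 ∨ m % 3 = 1 ∨ m % 3 = 2 := by omega
      rcases h3 with h | h | h <;>
        simp [h, Nat.add_mod, PySem.List.pyGetD, PySem.List.pyGet?, PySem.List.pyIdx?]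

-- A's negative-sense loop: n ≥ 1 steps from a list with ≥ 3 elements
theorem fold_neg (n : ℕ) (a b c : Int) (rest : List Int) (hn : n ≠ 0) :
    (List.range n).foldl
      (fun c' _ => [PySem.List.pyGetD c' 2 0, PySem.List.pyGetD c' 0 0, PySem.List.pyGetD c' 1 0])
      (a :: b :: c :: rest) =
      if n % 3 = 0 then [a, b, c] else if n % 3 = 1 then [c, a, b] else [b, c, a] := by
  induction n with
  | zero => exact absurd rfl hn
  | succ m ih =>
    rcases Nat.eq_zero_or_pos m with hm | hm
    · subst hm
      simp [PySem.List.pyGetD, PySem.List.pyGet?, PySem.List.pyIdx?]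
    · rw [List.range_succ, List.foldl_append, ih (by omega)]
      have h3 : m % 3 = 0 ∨ m % 3 = 1 ∨ m % 3 = 2 := by omega
      rcases h3 with h | h | h <;>
        simp [h, Nat.add_mod, PySem.List.pyGetD, PySem.List.pyGet?, PySem.List.pyIdx?]

-- A at sense = 0 is the identity
theorem a_zero (color : List Int) : rotate_color color 0 = color := by
  simp [rotate_color]

-- ===== VERDICT (by name: the statement is the Claim_ definition above) =====
theorem rotate_color_spec : Claim_unchanged_rotate_color := by
  intro color sense _ hpre hnd
  by_cases hz : sense = 0
  · subst hz
    have hlen : color.length ≤ 3 := by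
      by_contra hlong
      exact hnd ⟨by omega, rfl⟩
    rw [a_zero, alt_zero, List.take_of_length_le hlen]
  · have hlen : 3 ≤ color.length := by
      rcases hpre with h | h
      · exact absurd h hz
      · exact h
    rcases color with _ | ⟨a, _ | ⟨b, _ | ⟨c, rest⟩⟩⟩ <;> simp at hlen
    rw [alt_eval]
    have hm : PySem.Int.mod sense 3 = sense % 3 := PySem.Int.mod_eq_emod_of_pos (by omega)
    rw [hm]
    by_cases hs : sense < 0
    · set n := (-sense).toNat with hndef
      have hn : (n : Int) = -sense := Int.toNat_of_nonneg (by omega)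
      rw [rotate_color, if_pos hs, fold_neg _ _ _ _ _ (by omega)]
      have h3 : n % 3 = 0 ∨ n % 3 = 1 ∨ n % 3 = 2 := by omega
      rcases h3 with h | h | h
      · have hs3 : sense % 3 = 0 := by omega
        simp [← hndef, h, hs3]
      · have hs3 : sense % 3 = 2 := by omega
        simp [← hndef, h, hs3]
      · have hs3 : sense % 3 = 1 := by omega
        simp [← hndef, h, hs3]
    · set n := sense.toNat with hndef
      have hn : (n : Int) = sense := Int.toNat_of_nonneg (by omega)
      rw [rotate_color, if_neg hs, fold_pos _ _ _ _ _ (by omega)]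
      have h3 : n % 3 = 0 ∨ n % 3 = 1 ∨ n % 3 = 2 := by omega
      rcases h3 with h | h | h
      · have hs3 : sense % 3 = 0 := by omega
        simp [← hndef, h, hs3]
      · have hs3 : sense % 3 = 1 := by omega
        simp [← hndef, h, hs3]
      · have hs3 : sense % 3 = 2 := by omega
        simp [← hndef, h, hs3]

theorem rotate_color_changed : Claim_changed_rotate_color := by
  unfold Claim_changed_rotate_color; decide

theorem rotate_color_tight : Claim_exact_rotate_color := by
  intro color sense _ _ hd heq
  obtain ⟨hlen, hz⟩ := hd
  subst hz
  rw [a_zero, alt_zero] at heq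
  have := congrArg List.length heq
  simp [List.length_take] at this
  omega
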